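-- pv_equiv track=rewrite | github.com/discolemur/slithering-scripts | fastaToPhylip.py | remove_stop_codons
-- ===== SOURCE A (Python) =====
-- def remove_stop_codons(seq) :
--     stop_codons = ['TAG','TAA','TGA']
--     nucs = 0
--     seq = list(seq)
--     codon = ''
--     places = []
--     for i in range(1, len(seq) + 1) :
--         # Look backwards
--         pos = 0 - i
--         if nucs == 3 :
--             break
--         if seq[pos] != '-' :
--             codon = seq[pos] + codon
--             places.append(pos)
--             nucs += 1
--     # places is sorted , least negative to most negative
--     if codon.upper() in stop_codons :
--         size = len(seq)
--         # Remove locations, from back to front to keep from frame shift errors.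
--         for pos in places :
--             del(seq[size + pos])
--     return ''.join(seq)
-- ===== SOURCE B (Python) =====
-- def remove_stop_codons(seq):
--     chars = list(seq)
--     idx = [i for i, c in enumerate(chars) if c != '-']
--     last3 = idx[-3:]
--     codon = ''.join(chars[i] for i in last3)
--     if len(last3) == 3 and codon.upper() in ('TAG', 'TAA', 'TGA'):
--         kill = set(last3)
--         return ''.join(c for i, c in enumerate(chars) if i not in kill)
--     return seq
-- ===== Notes on version B (the rewrite author's own statement) =====
-- stated objective: simpler
-- what changed: A's backward index scan with an early break and in-place back-to-front deletions is replaced by a forward pass that tabulates all non-dash positions, slices the last three, and rebuilds the string by filtering those positions out.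
import Mathlib
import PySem

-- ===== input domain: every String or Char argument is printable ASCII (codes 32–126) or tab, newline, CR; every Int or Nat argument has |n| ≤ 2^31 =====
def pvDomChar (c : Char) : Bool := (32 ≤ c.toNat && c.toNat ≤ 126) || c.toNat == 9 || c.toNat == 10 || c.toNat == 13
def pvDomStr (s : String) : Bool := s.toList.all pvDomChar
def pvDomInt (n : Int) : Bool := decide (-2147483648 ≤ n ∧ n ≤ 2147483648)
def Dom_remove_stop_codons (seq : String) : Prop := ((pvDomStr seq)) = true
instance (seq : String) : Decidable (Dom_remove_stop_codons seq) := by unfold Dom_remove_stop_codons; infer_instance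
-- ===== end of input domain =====

-- B replaces A's backward early-breaking index scan by a forward non-dash index table
-- whose 3-element tail is inspected and deleted (objective: simpler decomposition).

-- ===== PORT A =====
def pvStopsA : List (List Char) := [['T','A','G'], ['T','A','A'], ['T','G','A']]

-- the 'for i in range(1, len(seq)+1)' loop with its break, state (nucs, codon, places)
def pvLoopA (cs : List Char) (i : Nat) (nucs : Nat) (codon : List Char) (places : List Int) :
    List Char × List Int :=
  if _h : i ≤ cs.length then
    if nucs = 3 then (codon, places)
    else
      match PySem.List.pyGet? cs (0 - (i : Int)) with
      | none => (codon, places)  -- unreachable: 1 ≤ i ≤ len(seq) keeps seq[-i] in range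
      | some c =>
        if c ≠ '-' then pvLoopA cs (i + 1) (nucs + 1) (c :: codon) (places ++ [0 - (i : Int)])
        else pvLoopA cs (i + 1) nucs codon places
  else (codon, places)
termination_by cs.length + 1 - i
decreasing_by all_goals omega

def remove_stop_codons (seq : String) : String :=
  let cs := seq.toList
  let r := pvLoopA cs 1 0 [] []
  if PySem.Chars.upper r.1 ∈ pvStopsA then
    -- 'del seq[size + pos]' back to front; size + pos is a valid non-negative index here
    String.ofList (r.2.foldl (fun s pos => s.eraseIdx ((cs.length : Int) + pos).toNat) cs)
  else String.ofList cs

-- ===== PORT B =====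
def pvStopsB : List (List Char) := [['T','A','G'], ['T','A','A'], ['T','G','A']]

def remove_stop_codons_alt (seq : String) : String :=
  let chars := seq.toList
  let idx := ((PySem.List.enumerate chars).filter (fun p => p.2 != '-')).map (·.1)
  let last3 := PySem.List.slice idx (some (-3))
  -- chars[i] for i in last3: every i there is a valid index, so getD is exact
  let codon := last3.map (fun i => (PySem.List.pyGet? chars i).getD ' ')
  if last3.length = 3 ∧ PySem.Chars.upper codon ∈ pvStopsB then
    let kill := PySem.Set.ofList last3
    String.ofList (((PySem.List.enumerate chars).filter
      (fun p => !(PySem.Set.contains kill p.1))).map (·.2))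
  else seq

-- ===== PRECONDITION & SPEC =====
def Spec_remove_stop_codons (seq : String) (out : String) : Prop := out = remove_stop_codons_alt seq
instance (seq : String) (out : String) : Decidable (Spec_remove_stop_codons seq out) := by unfold Spec_remove_stop_codons; infer_instance

-- ===== CLAIM (what is proved, stated in full; the proofs are below) =====
def Claim_equal_remove_stop_codons : Prop := ∀ (seq : String), Dom_remove_stop_codons seq → Spec_remove_stop_codons seq (remove_stop_codons seq)

-- ===== LEMMAS AND PROOFS =====

-- the (position, char) pairs A's backward scan collects: the first k non-dash
-- characters of r, paired with positions pos, pos-1, …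
def pvTake3 : List Char → Int → Nat → List (Int × Char)
  | [], _, _ => []
  | _ :: _, _, 0 => []
  | c :: r, pos, k + 1 =>
    if c ≠ '-' then (pos, c) :: pvTake3 r (pos - 1) k else pvTake3 r (pos - 1) (k + 1)

-- the forward non-dash table B builds (with the characters still attached)
def pvND (cs : List Char) : List (Int × Char) :=
  (PySem.List.enumerate cs).filter (fun p => p.2 != '-')

lemma pvTake3_zero (r : List Char) (pos : Int) : pvTake3 r pos 0 = [] := by
  cases r <;> rfl

lemma pvTake3_shift (r : List Char) : ∀ (pos d : Int) (k : Nat),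
    pvTake3 r (pos + d) k = (pvTake3 r pos k).map (fun p => (p.1 + d, p.2)) := by
  induction r with
  | nil => intro pos d k; rfl
  | cons c r ih =>
    intro pos d k
    cases k with
    | zero => rfl
    | succ k =>
      by_cases hc : c = '-'
      · simp only [pvTake3, hc, if_neg, not_ne_iff]
        have := ih (pos - 1) d (k + 1)
        rw [show pos + d - 1 = pos - 1 + d by ring] at *
        simpa using this
      · simp only [pvTake3, if_pos hc, ne_eq]
        rw [show pos + d - 1 = pos - 1 + d by ring, ih (pos - 1) d k]
        simp

lemma pv_mem_enumerate {cs : List Char} {s : Int} {p : Int × Char}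
    (h : p ∈ PySem.List.enumerate cs s) :
    s ≤ p.1 ∧ p.1 < s + cs.length ∧ cs[(p.1 - s).toNat]? = some p.2 := by
  rw [PySem.List.enumerate_eq_zipIdx_map] at h
  simp only [List.mem_map] at h
  obtain ⟨⟨x, j⟩, hmem, hp⟩ := h
  obtain ⟨-, hj, hx⟩ := List.mem_zipIdx hmem
  subst hp
  refine ⟨by omega, by simp; omega, ?_⟩
  rw [show s + (j:Int) - s = (j:Int) by ring]
  simp only [Int.toNat_natCast]
  simp at hj
  rw [List.getElem?_eq_getElem (by omega)]
  simp [hx]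

lemma pv_enumerate_map_snd (cs : List Char) (s : Int) :
    (PySem.List.enumerate cs s).map (·.2) = cs := by
  rw [PySem.List.enumerate_eq_zipIdx_map, List.map_map]
  simp [Function.comp_def]

lemma pv_enumerate_pairwise (cs : List Char) (s : Int) :
    (PySem.List.enumerate cs s).Pairwise (fun p q => p.1 < q.1) := by
  induction cs generalizing s with
  | nil => simp [PySem.List.enumerate]
  | cons c cs ih =>
    rw [PySem.List.enumerate_cons]
    refine List.Pairwise.cons ?_ (ih (s + 1))
    intro q hq
    have := pv_mem_enumerate hq
    omega

lemma pv_filter_true_map_snd (cs : List Char) (s : Int) (pred : Int × Char → Bool)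
    (h : ∀ p ∈ PySem.List.enumerate cs s, pred p = true) :
    ((PySem.List.enumerate cs s).filter pred).map (·.2) = cs := by
  rw [List.filter_eq_self.mpr h, pv_enumerate_map_snd]

lemma pv_pyGet_neg (cs : List Char) (i : Nat) (h1 : 1 ≤ i) (h2 : i ≤ cs.length)
    (hr : i - 1 < cs.reverse.length) :
    PySem.List.pyGet? cs (0 - (i : Int)) = some (cs.reverse[i-1]'hr) := by
  have hlen : cs.reverse.length = cs.length := by simp
  rw [← List.getElem?_eq_getElem, List.getElem?_reverse (by omega)]
  simp only [PySem.List.pyGet?, PySem.List.pyIdx?]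
  rw [if_neg (by omega), if_pos (by omega)]
  simp only [Option.bind]
  congr 1
  omega

-- A's loop, characterised by pvTake3 over the reversed remaining input
lemma pvLoopA_eq (m : Nat) (cs : List Char) : ∀ (i : Nat) (nucs : Nat) (codon : List Char)
    (places : List Int), cs.length + 1 - i ≤ m → 1 ≤ i → nucs ≤ 3 →
    pvLoopA cs i nucs codon places =
      (((pvTake3 (cs.reverse.drop (i - 1)) (0 - (i : Int)) (3 - nucs)).map (·.2)).reverse ++ codon,
       places ++ (pvTake3 (cs.reverse.drop (i - 1)) (0 - (i : Int)) (3 - nucs)).map (·.1)) := by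
  induction m with
  | zero =>
    intro i nucs codon places hm h1 h3
    have hgt : ¬ i ≤ cs.length := by omega
    rw [pvLoopA, dif_neg hgt]
    rw [List.drop_eq_nil_of_le (by simp; omega)]
    simp [pvTake3]
  | succ m ih =>
    intro i nucs codon places hm h1 h3
    by_cases hle : i ≤ cs.length
    · have hr : i - 1 < cs.reverse.length := by simp; omega
      have hi1 : i - 1 + 1 = i := by omega
      have hdrop : cs.reverse.drop (i - 1) = cs.reverse[i-1]'hr :: cs.reverse.drop i := by
        rw [List.drop_eq_getElem_cons hr, hi1]
      rw [pvLoopA, dif_pos hle]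
      by_cases hn : nucs = 3
      · rw [if_pos hn, hn]
        simp [pvTake3_zero]
      · rw [if_neg hn, pv_pyGet_neg cs i h1 hle hr]
        dsimp only
        have hk : 3 - nucs = (3 - (nucs + 1)) + 1 := by omega
        have hpos : (0 - (i:Int)) - 1 = 0 - ((i+1 : Nat) : Int) := by push_cast; ring
        set c := cs.reverse[i-1]'hr with hc
        by_cases hdash : c = '-'
        · rw [if_neg (by simp [hdash])]
          rw [ih (i+1) nucs codon places (by omega) (by omega) h3]
          rw [hdrop, hk]
          simp only [pvTake3, if_neg (by simp [hdash] : ¬ c ≠ '-')]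
          rw [hpos, ← hk, Nat.add_sub_cancel]
        · rw [if_pos hdash]
          rw [ih (i+1) (nucs+1) (c :: codon) (places ++ [0 - (i:Int)]) (by omega) (by omega) (by omega)]
          rw [hdrop, hk]
          simp only [pvTake3, if_pos hdash]
          rw [hpos, Nat.add_sub_cancel]
          simp [List.append_assoc]
    · have hgt : ¬ i ≤ cs.length := hle
      rw [pvLoopA, dif_neg hgt]
      rw [List.drop_eq_nil_of_le (by simp; omega)]
      simp [pvTake3]

-- the backward scan is the tail of B's forward non-dash table, reversed and re-indexed
lemma pvTake3_rev (cs : List Char) : ∀ (k : Nat),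
    pvTake3 cs.reverse (-1) k =
      ((pvND cs).drop ((pvND cs).length - k)).reverse.map
        (fun p => (p.1 - (cs.length : Int), p.2)) := by
  induction cs using List.reverseRecOn with
  | nil => intro k; simp [pvND, PySem.List.enumerate, pvTake3]
  | append_singleton cs c ih =>
    intro k
    have hnd : pvND (cs ++ [c]) =
        pvND cs ++ (if c ≠ '-' then [((cs.length : Int), c)] else []) := by
      unfold pvND
      rw [PySem.List.enumerate_append, List.filter_append]
      by_cases hc : c = '-'
      · simp [PySem.List.enumerate_cons, PySem.List.enumerate_nil, hc]
      · simp [PySem.List.enumerate_cons, PySem.List.enumerate_nil, hc]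
    have hlen : ((cs ++ [c]).length : Int) = (cs.length : Int) + 1 := by simp
    rw [List.reverse_append, List.reverse_singleton, List.singleton_append]
    by_cases hc : c = '-'
    · cases k with
      | zero => simp [pvTake3_zero]
      | succ k =>
        simp only [pvTake3, if_neg (by simp [hc] : ¬ c ≠ '-')]
        rw [show (-1 : Int) - 1 = -1 + -1 by ring, pvTake3_shift, ih]
        rw [hnd, if_neg (by simp [hc]), List.append_nil, hlen]
        rw [List.map_map]
        apply List.map_congr_left
        intro p _
        simp only [Function.comp_apply, Prod.mk.injEq]
        exact ⟨by ring, trivial⟩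
    · cases k with
      | zero => simp [pvTake3_zero]
      | succ k =>
        simp only [pvTake3, if_pos hc]
        rw [show (-1 : Int) - 1 = -1 + -1 by ring, pvTake3_shift, ih]
        rw [hnd, if_pos hc, hlen]
        have hm : (pvND cs ++ [((cs.length : Int), c)]).length - (k + 1) =
            (pvND cs).length - k := by simp
        rw [hm, List.drop_append_of_le_length (by omega)]
        rw [List.reverse_append, List.reverse_singleton, List.singleton_append,
          List.map_cons, List.map_map]
        congr 1
        · simp only [Prod.mk.injEq]
          exact ⟨by ring, trivial⟩
        · apply List.map_congr_left
          intro p _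
          simp only [Function.comp_apply, Prod.mk.injEq]
          exact ⟨by ring, trivial⟩

-- deleting a strictly descending list of valid indices = filtering those indices out
lemma pv_foldl_erase (ds : List Int) : ∀ (cs : List Char),
    ds.Pairwise (fun a b => a > b) → (∀ d ∈ ds, 0 ≤ d ∧ d < (cs.length : Int)) →
    ds.foldl (fun s d => s.eraseIdx d.toNat) cs =
      ((PySem.List.enumerate cs).filter (fun p => !(ds.contains p.1))).map (·.2) := by
  induction ds with
  | nil =>
    intro cs _ _
    rw [List.foldl_nil, List.filter_eq_self.mpr (by simp), pv_enumerate_map_snd]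
  | cons d ds ih =>
    intro cs hpw hbd
    obtain ⟨hd0, hdlt⟩ := hbd d (by simp)
    rw [List.pairwise_cons] at hpw
    obtain ⟨hgt, hpw'⟩ := hpw
    have hdn : d.toNat < cs.length := by omega
    rw [List.foldl_cons]
    rw [ih (cs.eraseIdx d.toNat) hpw' (by
      intro e he
      have h1 := hbd e (by simp [he])
      have h2 := hgt e he
      rw [List.length_eraseIdx_of_lt hdn]
      constructor
      · omega
      · omega)]
    have hsplit : cs = cs.take d.toNat ++ cs[d.toNat] :: cs.drop (d.toNat + 1) := by
      conv_lhs => rw [← List.take_append_drop d.toNat cs]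
      rw [List.drop_eq_getElem_cons hdn]
    have htl : (cs.take d.toNat).length = d.toNat := by simp; omega
    rw [List.eraseIdx_eq_take_drop_succ]
    rw [PySem.List.enumerate_append]
    conv_rhs => rw [hsplit, PySem.List.enumerate_append, PySem.List.enumerate_cons]
    rw [List.filter_append, List.filter_append, List.map_append, List.map_append]
    rw [htl]
    congr 1
    · -- on the common prefix the two predicates agree (no index there equals d)
      congr 1
      apply List.filter_congr
      intro p hp
      have h1 := pv_mem_enumerate hp
      rw [htl] at h1
      have hne : p.1 ≠ d := by omega
      simp [hne]
    · -- the deleted element goes, every suffix element stays on both sides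
      have hh : (!((d :: ds).contains ((0:Int) + ↑d.toNat))) = false := by
        simp only [Bool.not_eq_false']
        have he : ((0:Int) + ↑d.toNat) = d := by omega
        rw [he]
        simp
      rw [List.filter_cons]
      simp only [hh, Bool.false_eq_true, if_false]
      rw [pv_filter_true_map_snd _ _ _ (by
        intro p hp
        have h1 := pv_mem_enumerate hp
        have : p.1 ∉ ds := by
          intro hmem
          have := hgt _ hmem
          omega
        simpa using this)]
      rw [pv_filter_true_map_snd _ _ _ (by
        intro p hp
        have h1 := pv_mem_enumerate hp
        have h2 : p.1 ∉ ds := by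
          intro hmem
          have := hgt _ hmem
          omega
        have h3 : ¬ p.1 = d := by omega
        simp
        exact ⟨h3, by simpa using h2⟩)]

lemma pv_main (seq : String) : remove_stop_codons seq = remove_stop_codons_alt seq := by
  simp only [remove_stop_codons, remove_stop_codons_alt]
  set cs := seq.toList with hcs
  set N := pvND cs with hN
  set T := N.drop (N.length - 3) with hT
  have hNdef : ((PySem.List.enumerate cs).filter (fun p => p.2 != '-')) = N := rfl
  have hmemN : ∀ p ∈ N, 0 ≤ p.1 ∧ p.1 < (cs.length : Int) ∧
      PySem.List.pyGet? cs p.1 = some p.2 := by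
    intro p hp
    have hpe : p ∈ PySem.List.enumerate cs := List.mem_of_mem_filter hp
    have h1 := pv_mem_enumerate hpe
    refine ⟨by omega, by omega, ?_⟩
    simp only [PySem.List.pyGet?, PySem.List.pyIdx?]
    rw [if_pos (by omega), if_pos (by omega)]
    simp only [Option.bind]
    have := h1.2.2
    rw [show p.1 - 0 = p.1 by ring] at this
    exact this
  have hmemT : ∀ p ∈ T, p ∈ N := fun p hp => List.mem_of_mem_drop hp
  have hloop : pvLoopA cs 1 0 [] [] =
      (T.map (·.2), T.reverse.map (fun p => p.1 - (cs.length : Int))) := by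
    rw [pvLoopA_eq (cs.length + 1) cs 1 0 [] [] (by omega) le_rfl (by omega)]
    rw [show (0 - ((1:Nat) : Int)) = -1 by norm_num, Nat.sub_self, List.drop_zero]
    rw [show (3 - 0 : Nat) = 3 from rfl, pvTake3_rev cs 3, ← hN, ← hT]
    simp [List.map_map, Function.comp_def]
  rw [hloop, hNdef]
  have hidx : PySem.List.slice (N.map (·.1)) (some (-3)) = T.map (·.1) := by
    rw [PySem.List.slice_from_neg_ofNat _ 3 (by norm_num), hT]
    simp [List.map_drop]
  rw [hidx]
  have hcodon : (T.map (·.1)).map (fun i => (PySem.List.pyGet? cs i).getD ' ') =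
      T.map (·.2) := by
    rw [List.map_map]
    apply List.map_congr_left
    intro p hp
    simp [(hmemN p (hmemT p hp)).2.2]
  rw [hcodon]
  have hst : pvStopsB = pvStopsA := rfl
  rw [hst]
  by_cases hA : PySem.Chars.upper (T.map (·.2)) ∈ pvStopsA
  · have hlen3 : (T.map (·.1)).length = 3 := by
      have hl : (PySem.Chars.upper (T.map (·.2))).length = T.length := by
        simp [PySem.Chars.upper]
      have h3 : (PySem.Chars.upper (T.map (·.2))).length = 3 := by
        rcases (by simpa [pvStopsA] using hA) with h | h | h <;> simp [h]
      simp only [List.length_map]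
      omega
    rw [if_pos hA, if_pos ⟨hlen3, hA⟩]
    have hpairN : N.Pairwise (fun p q => p.1 < q.1) :=
      List.Pairwise.filter _ (pv_enumerate_pairwise cs 0)
    have hpairT : T.Pairwise (fun p q => p.1 < q.1) :=
      List.Pairwise.sublist (List.drop_sublist _ _) hpairN
    have hpair : (T.reverse.map (·.1)).Pairwise (fun a b => a > b) := by
      rw [List.pairwise_map, List.pairwise_reverse]
      exact hpairT
    have hbnd : ∀ d ∈ T.reverse.map (·.1), 0 ≤ d ∧ d < (cs.length : Int) := by
      intro d hd
      simp only [List.mem_map, List.mem_reverse] at hd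
      obtain ⟨p, hp, rfl⟩ := hd
      have := hmemN p (hmemT p hp)
      exact ⟨this.1, this.2.1⟩
    congr 1
    rw [List.foldl_map]
    rw [PySem.List.foldl_congr_mem _ _ (fun (s : List Char) (p : Int × Char) =>
      s.eraseIdx p.1.toNat) _ (by
        intro acc x _
        rw [show (cs.length : Int) + (x.1 - cs.length) = x.1 by ring])]
    rw [show T.reverse.foldl (fun (s : List Char) (p : Int × Char) => s.eraseIdx p.1.toNat) cs
        = (T.reverse.map (·.1)).foldl (fun s d => s.eraseIdx d.toNat) cs from
      (List.foldl_map (f := fun p : Int × Char => p.1)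
        (g := fun (s : List Char) (d : Int) => s.eraseIdx d.toNat)
        (l := T.reverse) (init := cs)).symm]
    rw [pv_foldl_erase _ cs hpair hbnd]
    congr 1
    apply List.filter_congr
    intro p _
    simp [PySem.Set.contains, PySem.Set.mem_ofList, List.mem_reverse]
  · rw [if_neg hA, if_neg (by rintro ⟨-, h⟩; exact hA h)]
    simp [hcs]

-- ===== VERDICT (by name: the statement is the Claim_ definition above) =====
theorem remove_stop_codons_spec : Claim_equal_remove_stop_codons := by
  intro seq _
  exact pv_main seq
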